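-- pv_equiv track=rewrite | github.com/syatt-io/pm-dashboard | src/services/epic_mapping_service.py | generate_placeholder_epic_key
-- ===== SOURCE A (Python) =====
-- from typing import Dict, List, Any, Union
--
-- def generate_placeholder_epic_key(
--     project_key: str, existing_placeholders: List[str]
-- ) -> str:
--     """
--     Generate unique synthetic epic key for placeholder epics.
--
--     Args:
--         project_key: Project key (e.g., "SUBS")
--         existing_placeholders: List of existing placeholder keys to avoid collisions
--
--     Returns:
--         Unique synthetic key like "SUBS-FORECAST-1"
--     """
--     counter = 1
--     while True:
--         candidate = f"{project_key}-FORECAST-{counter}"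
--         if candidate not in existing_placeholders:
--             return candidate
--         counter += 1
-- ===== SOURCE B (Python) =====
-- def generate_placeholder_epic_key(project_key, existing_placeholders):
--     prefix = f"{project_key}-FORECAST-"
--     suffixes = {s[len(prefix):] for s in existing_placeholders if s.startswith(prefix)}
--     # the answer's number is at most len(existing)+1, so index the taken slots in that
--     # bounded window; the comprehension yields them already in increasing order
--     used = [i for i in range(1, len(existing_placeholders) + 2) if str(i) in suffixes]
--     n = 1
--     for v in used:
--         if v == n:
--             n += 1
--     return f"{prefix}{n}"
-- ===== Notes on version B (the rewrite author's own statement) =====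
-- stated objective: alternative
-- what changed: A probes candidate strings with an unbounded while-loop, rescanning the list each time; B never probes: it builds the suffix set in one pass, materialises the sorted list of taken numeric slots inside the bounded window 1..len+1, and a final gap-scan over that sorted list (incrementing only on v == n, no membership test) yields the first free number.
import Mathlib
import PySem

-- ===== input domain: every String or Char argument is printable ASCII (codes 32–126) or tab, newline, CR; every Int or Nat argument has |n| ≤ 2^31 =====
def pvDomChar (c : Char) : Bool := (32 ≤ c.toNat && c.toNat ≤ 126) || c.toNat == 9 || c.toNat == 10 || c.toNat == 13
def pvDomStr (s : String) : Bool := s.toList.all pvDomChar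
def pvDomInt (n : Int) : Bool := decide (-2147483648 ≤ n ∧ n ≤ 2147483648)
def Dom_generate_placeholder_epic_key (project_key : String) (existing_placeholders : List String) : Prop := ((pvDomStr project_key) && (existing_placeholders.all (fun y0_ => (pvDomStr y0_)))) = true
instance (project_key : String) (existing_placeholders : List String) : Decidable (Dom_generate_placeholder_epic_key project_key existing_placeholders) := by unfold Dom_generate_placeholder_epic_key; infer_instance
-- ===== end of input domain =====

-- B replaces A's unbounded probe-and-rescan loop by staged passes: a suffix set, the sorted
-- list of taken numeric slots in the bounded window 1..len+1, and a gap scan over that list;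
-- equal return value proved on the whole domain.

-- ===== PORT A =====
-- A's `while True` probe loop; one fuel unit per iteration.  Fuel `len(existing)+1` always
-- suffices (the L+1 distinct candidates cannot all lie in a list of length L), so the fuel-0
-- branch (returning the current candidate unchecked) is unreachable; it only makes the
-- recursion total.
def pvALoop (pre : List Char) (ex : List (List Char)) (counter : Int) : Nat → List Char
  | 0 => pre ++ PySem.Int.toChars counter
  | fuel + 1 =>
    let candidate := pre ++ PySem.Int.toChars counter
    if candidate ∈ ex then pvALoop pre ex (counter + 1) fuel else candidate

def generate_placeholder_epic_key (project_key : String) (existing_placeholders : List String) : String :=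
  String.ofList (pvALoop (project_key.toList ++ "-FORECAST-".toList)
    (existing_placeholders.map String.toList) 1 (existing_placeholders.length + 1))

-- ===== PORT B =====
-- the set comprehension {s[len(prefix):] for s in existing_placeholders if s.startswith(prefix)}
def pvBSufs (pre : List Char) (ex : List (List Char)) : PySem.Set (List Char) :=
  PySem.Set.ofList ((ex.filter (fun s => PySem.Chars.startswith s pre)).map (fun s => s.drop pre.length))

-- [i for i in range(1, len(existing)+2) if str(i) in suffixes]
def pvBUsed (pre : List Char) (ex : List (List Char)) : List Int :=
  (PySem.List.pyRange 1 (PySem.List.len ex + 2) 1).filter (fun i => PySem.Int.toChars i ∈ pvBSufs pre ex)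

-- n = 1; for v in used: if v == n: n += 1
def pvBScan (used : List Int) : Int :=
  used.foldl (fun n v => if v = n then n + 1 else n) 1

def generate_placeholder_epic_key_alt (project_key : String) (existing_placeholders : List String) : String :=
  let pre := project_key.toList ++ "-FORECAST-".toList
  let exL := existing_placeholders.map String.toList
  String.ofList (pre ++ PySem.Int.toChars (pvBScan (pvBUsed pre exL)))

-- ===== PRECONDITION & SPEC =====
def Spec_generate_placeholder_epic_key (project_key : String) (existing_placeholders : List String) (out : String) : Prop := out = generate_placeholder_epic_key_alt project_key existing_placeholders
instance (project_key : String) (existing_placeholders : List String) (out : String) : Decidable (Spec_generate_placeholder_epic_key project_key existing_placeholders out) := by unfold Spec_generate_placeholder_epic_key; infer_instance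

-- ===== CLAIM (what is proved, stated in full; the proofs are below) =====
def Claim_equal_generate_placeholder_epic_key : Prop := ∀ (project_key : String) (existing_placeholders : List String), Dom_generate_placeholder_epic_key project_key existing_placeholders → Spec_generate_placeholder_epic_key project_key existing_placeholders (generate_placeholder_epic_key project_key existing_placeholders)

-- ===== LEMMAS AND PROOFS =====

-- B's suffix set contains exactly the suffixes of prefix-matching entries:
-- t is in the set iff pre ++ t is an existing placeholder.
lemma pv_mem_sufs (pre : List Char) (ex : List (List Char)) (t : List Char) :
    t ∈ pvBSufs pre ex ↔ pre ++ t ∈ ex := by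
  unfold pvBSufs
  rw [PySem.Set.mem_ofList]
  simp only [List.mem_map, List.mem_filter]
  constructor
  · rintro ⟨s, ⟨hs, hpre⟩, rfl⟩
    have h : pre <+: s := (PySem.Chars.startswith_iff s pre).mp hpre
    obtain ⟨r, rfl⟩ := h
    simpa using hs
  · intro h
    exact ⟨pre ++ t, ⟨h, (PySem.Chars.startswith_iff _ _).mpr ⟨t, rfl⟩⟩, by simp⟩

-- membership in B's window of taken slots
lemma pv_mem_used (pre : List Char) (ex : List (List Char)) (c : Int) :
    c ∈ pvBUsed pre ex ↔ (1 ≤ c ∧ c < (ex.length : Int) + 2) ∧ pre ++ PySem.Int.toChars c ∈ ex := by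
  unfold pvBUsed
  rw [List.mem_filter]
  simp [PySem.List.mem_pyRange_one, pv_mem_sufs]

-- the taken slots are listed in strictly increasing order (a filter of range(1, L+2))
lemma pv_used_pairwise (pre : List Char) (ex : List (List Char)) :
    (pvBUsed pre ex).Pairwise (· < ·) :=
  List.Pairwise.filter _ (PySem.List.pairwise_lt_pyRange_one 1 _)

-- the gap scan over a strictly increasing list computes the first value ≥ n₀ not in it
lemma pv_scan_mex (l : List Int) (n₀ : Int) (hl : l.Pairwise (· < ·)) :
    n₀ ≤ l.foldl (fun n v => if v = n then n + 1 else n) n₀ ∧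
    l.foldl (fun n v => if v = n then n + 1 else n) n₀ ∉ l ∧
    ∀ m, n₀ ≤ m → m < l.foldl (fun n v => if v = n then n + 1 else n) n₀ → m ∈ l := by
  induction l generalizing n₀ with
  | nil => exact ⟨le_refl _, by simp, fun m h1 h2 => absurd (lt_of_le_of_lt h1 h2) (lt_irrefl _)⟩
  | cons v t ih =>
    have hvt : ∀ x ∈ t, v < x := fun x hx => (List.pairwise_cons.mp hl).1 x hx
    have ht : t.Pairwise (· < ·) := (List.pairwise_cons.mp hl).2
    simp only [List.foldl_cons]
    by_cases hv : v = n₀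
    · rw [if_pos hv]
      obtain ⟨h1, h2, h3⟩ := ih (n₀ + 1) ht
      refine ⟨by omega, ?_, ?_⟩
      · simp only [List.mem_cons, not_or]
        exact ⟨fun he => by omega, h2⟩
      · intro m hm1 hm2
        rcases eq_or_lt_of_le hm1 with he | hlt
        · exact List.mem_cons.mpr (Or.inl (by omega))
        · exact List.mem_cons.mpr (Or.inr (h3 m (by omega) hm2))
    · rw [if_neg hv]
      obtain ⟨h1, h2, h3⟩ := ih n₀ ht
      refine ⟨h1, ?_, fun m hm1 hm2 => List.mem_cons.mpr (Or.inr (h3 m hm1 hm2))⟩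
      simp only [List.mem_cons, not_or]
      refine ⟨?_, h2⟩
      intro he
      -- if the fold result equalled v, then n₀ < result, so n₀ ∈ t, but v < every element of t
      rcases eq_or_lt_of_le h1 with h | h
      · exact hv (he.symm.trans h.symm)
      · have hn : n₀ ∈ t := h3 n₀ (le_refl _) h
        have := hvt n₀ hn
        omega

-- A's probe loop reaches B's gap value r and returns its candidate, given that every
-- slot before r is taken, r itself is free when it lies in the window, and the fuel
-- window ends exactly at L+2.
lemma pv_aloop_eq (pre : List Char) (ex : List (List Char)) (r : Int)
    (hrle : r ≤ (ex.length : Int) + 2)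
    (hfree : r < (ex.length : Int) + 2 → pre ++ PySem.Int.toChars r ∉ ex)
    (htaken : ∀ m, 1 ≤ m → m < r → pre ++ PySem.Int.toChars m ∈ ex) :
    ∀ (fuel : Nat) (c : Int), 1 ≤ c → c ≤ r → c + fuel = (ex.length : Int) + 2 →
      pvALoop pre ex c fuel = pre ++ PySem.Int.toChars r := by
  intro fuel
  induction fuel with
  | zero =>
    intro c h1 h2 h3
    have hcr : c = r := by omega
    simp [pvALoop, hcr]
  | succ f ih =>
    intro c h1 h2 h3
    simp only [pvALoop]
    rcases lt_or_eq_of_le h2 with h | h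
    · rw [if_pos (htaken c h1 h)]
      exact ih (c + 1) (by omega) (by omega) (by omega)
    · subst h
      rw [if_neg (hfree (by omega))]

-- ===== VERDICT (by name: the statement is the Claim_ definition above) =====
theorem generate_placeholder_epic_key_spec : Claim_equal_generate_placeholder_epic_key := by
  intro project_key existing_placeholders _
  unfold Spec_generate_placeholder_epic_key generate_placeholder_epic_key generate_placeholder_epic_key_alt
  set pre := project_key.toList ++ "-FORECAST-".toList
  set exL := existing_placeholders.map String.toList with hexL
  set r := pvBScan (pvBUsed pre exL) with hr
  obtain ⟨h1, h2, h3⟩ := pv_scan_mex (pvBUsed pre exL) 1 (pv_used_pairwise pre exL)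
  have hrdef : r = (pvBUsed pre exL).foldl (fun n v => if v = n then n + 1 else n) 1 := rfl
  rw [← hrdef] at h1 h2 h3
  have hlen : (exL.length : Int) = (existing_placeholders.length : Int) := by
    simp [hexL]
  have hrle : r ≤ (exL.length : Int) + 2 := by
    by_contra hgt
    push Not at hgt
    have := h3 ((exL.length : Int) + 2) (by omega) (by omega)
    rw [pv_mem_used] at this
    omega
  have hfree : r < (exL.length : Int) + 2 → pre ++ PySem.Int.toChars r ∉ exL := by
    intro hw hmem
    exact h2 ((pv_mem_used pre exL r).mpr ⟨⟨h1, hw⟩, hmem⟩)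
  have htaken : ∀ m, 1 ≤ m → m < r → pre ++ PySem.Int.toChars m ∈ exL := by
    intro m hm1 hm2
    have := h3 m hm1 hm2
    exact ((pv_mem_used pre exL m).mp this).2
  rw [pv_aloop_eq pre exL r hrle hfree htaken (existing_placeholders.length + 1) 1 (by omega)
    (by omega) (by omega)]
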